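-- pv_equiv track=rewrite | github.com/purelevenexim-ai/ANNASEOv1 | engines/intelligent_crawl_engine.py | _prioritize_crawl
-- ===== SOURCE A (Python) =====
-- from typing import Dict, List, Optional, Tuple
--
-- def _prioritize_crawl(classified: Dict[str, List[str]],
--                       start_url: str, max_pages: int) -> List[Tuple[str, str]]:
--     """Build prioritized crawl list."""
--     order = []
--
--     # 1. Homepage (always first)
--     for url in classified.get("homepage", [start_url])[:1]:
--         order.append((url, "homepage"))
--
--     # 2. About page (understand business)
--     for url in classified.get("about", [])[:2]:
--         order.append((url, "about"))
--
--     # 3. Product pages (core keywords)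
--     for url in classified.get("product", [])[:12]:
--         order.append((url, "product"))
--
--     # 4. Category pages (keyword clusters)
--     for url in classified.get("category", [])[:5]:
--         order.append((url, "category"))
--
--     # 5. Blog pages (content themes)
--     for url in classified.get("blog", [])[:8]:
--         order.append((url, "blog"))
--
--     # 6. Other pages (fill remaining slots)
--     remaining = max_pages - len(order)
--     if remaining > 0:
--         for url in classified.get("other", [])[:remaining]:
--             order.append((url, "other"))
--
--     return order[:max_pages]
-- ===== SOURCE B (Python) =====
-- def _prioritize_crawl(classified, start_url, max_pages):
--     """Build prioritized crawl list by recursively spending a page budget over a priority plan."""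
--     plan = [("homepage", [start_url], 1), ("about", [], 2), ("product", [], 12),
--             ("category", [], 5), ("blog", [], 8), ("other", [], None)]
--
--     def spend(rows, remaining):
--         if remaining <= 0 or not rows:
--             return []
--         key, default, cap = rows[0]
--         take = remaining if cap is None else min(cap, remaining)
--         pages = classified.get(key, default)[:take]
--         return [(url, key) for url in pages] + spend(rows[1:], remaining - len(pages))
--
--     return spend(plan, max_pages)
-- ===== Notes on version B (the rewrite author's own statement) =====
-- stated objective: alternative
-- what changed: Replaces A's five staged append loops, a separate 'remaining' top-up pass and a final order[:max_pages] truncation by a single recursion that spends a running page budget over a (key, default, cap) priority plan, taking at most the remaining budget from each category and stopping when it is spent, with no final truncation.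
-- intended difference: On max_pages < 0 with more than |max_pages| prioritized pages available, A's final order[:max_pages] slice drops pages from the END and returns the remaining prefix (e.g. [('s','homepage'),('a','about')]), while B returns [], the intended value for a non-positive page budget. — e.g. on _prioritize_crawl([("about", ["a", "b"])], "s", -1): A returns [("s", "homepage"), ("a", "about")], B returns []
import Mathlib
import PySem

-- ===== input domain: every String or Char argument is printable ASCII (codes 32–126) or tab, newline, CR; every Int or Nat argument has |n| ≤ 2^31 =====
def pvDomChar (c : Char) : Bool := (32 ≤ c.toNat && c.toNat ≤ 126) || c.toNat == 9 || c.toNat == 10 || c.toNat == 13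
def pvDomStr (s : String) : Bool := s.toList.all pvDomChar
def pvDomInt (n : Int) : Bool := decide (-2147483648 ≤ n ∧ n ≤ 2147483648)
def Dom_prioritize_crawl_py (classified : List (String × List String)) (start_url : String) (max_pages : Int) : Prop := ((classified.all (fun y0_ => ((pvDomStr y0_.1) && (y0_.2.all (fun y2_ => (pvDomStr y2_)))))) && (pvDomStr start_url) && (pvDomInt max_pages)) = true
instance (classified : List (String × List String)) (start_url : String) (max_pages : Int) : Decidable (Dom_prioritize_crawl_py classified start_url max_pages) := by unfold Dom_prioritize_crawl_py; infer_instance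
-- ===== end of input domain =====

-- B replaces A's staged append loops + final truncation by a single recursion that spends a
-- running page budget over a priority plan (objective: alternative decomposition); on a
-- negative max_pages with enough pages A's final negative slice drops pages from the END and
-- returns the rest, while B returns [] — stated as the intended difference D_ below.

-- ===== PORT A =====
def prioritize_crawl_py (classified : List (String × List String)) (start_url : String) (max_pages : Int) : List (String × String) :=
  let order : List (String × String) := []
  let order := (PySem.List.slice (PySem.Dict.getD ⟨classified⟩ "homepage" [start_url]) none (some 1)).foldl
    (fun o u => o ++ [(u, "homepage")]) order
  let order := (PySem.List.slice (PySem.Dict.getD ⟨classified⟩ "about" []) none (some 2)).foldl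
    (fun o u => o ++ [(u, "about")]) order
  let order := (PySem.List.slice (PySem.Dict.getD ⟨classified⟩ "product" []) none (some 12)).foldl
    (fun o u => o ++ [(u, "product")]) order
  let order := (PySem.List.slice (PySem.Dict.getD ⟨classified⟩ "category" []) none (some 5)).foldl
    (fun o u => o ++ [(u, "category")]) order
  let order := (PySem.List.slice (PySem.Dict.getD ⟨classified⟩ "blog" []) none (some 8)).foldl
    (fun o u => o ++ [(u, "blog")]) order
  let remaining : Int := max_pages - (order.length : Int)
  let order := if remaining > 0 then
      (PySem.List.slice (PySem.Dict.getD ⟨classified⟩ "other" []) none (some remaining)).foldl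
        (fun o u => o ++ [(u, "other")]) order
    else order
  PySem.List.slice order none (some max_pages)

-- ===== PORT B =====
-- the recursive budget spender of Source B: takes from each plan row at most `remaining` pages
-- (capped rows take at most their cap), subtracts what it took, stops when the budget is spent
def pvSpend (classified : List (String × List String)) (rows : List (String × List String × Option Int)) (remaining : Int) : List (String × String) :=
  match rows with
  | [] => []
  | (key, dflt, cap) :: rest =>
    if remaining ≤ 0 then []
    else
      let tk : Int := match cap with | none => remaining | some c => min c remaining
      let pages := PySem.List.slice (PySem.Dict.getD ⟨classified⟩ key dflt) none (some tk)
      pages.map (fun url => (url, key)) ++ pvSpend classified rest (remaining - (pages.length : Int))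

def prioritize_crawl_py_alt (classified : List (String × List String)) (start_url : String) (max_pages : Int) : List (String × String) :=
  pvSpend classified
    [("homepage", [start_url], some 1), ("about", [], some 2), ("product", [], some 12),
     ("category", [], some 5), ("blog", [], some 8), ("other", [], none)]
    max_pages

-- ===== PRECONDITION & SPEC =====
-- number of pages in A's fixed (pre-'other') part; D_ uses it only as a length bound on the input
def pvMin (cl : List (String × List String)) (k : String) (d : List String) (c : Int) : Int :=
  min c ((PySem.Dict.getD ⟨cl⟩ k d).length : Int)

def pvFixedLen (cl : List (String × List String)) (s : String) : Int :=
  pvMin cl "homepage" [s] 1 + pvMin cl "about" [] 2 + pvMin cl "product" [] 12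
    + pvMin cl "category" [] 5 + pvMin cl "blog" [] 8

-- On max_pages < 0 with more than |max_pages| prioritized pages available, A's final
-- order[:max_pages] slice drops pages from the END and returns the rest; B returns [],
-- the intended value for a non-positive page budget.
def D_prioritize_crawl_py (classified : List (String × List String)) (start_url : String) (max_pages : Int) : Prop :=
  max_pages < 0 ∧ 0 < pvFixedLen classified start_url + max_pages
instance (classified : List (String × List String)) (start_url : String) (max_pages : Int) : Decidable (D_prioritize_crawl_py classified start_url max_pages) := by unfold D_prioritize_crawl_py; infer_instance

def Spec_prioritize_crawl_py (classified : List (String × List String)) (start_url : String) (max_pages : Int) (out : List (String × String)) : Prop := ¬ D_prioritize_crawl_py classified start_url max_pages → out = prioritize_crawl_py_alt classified start_url max_pages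
instance (classified : List (String × List String)) (start_url : String) (max_pages : Int) (out : List (String × String)) : Decidable (Spec_prioritize_crawl_py classified start_url max_pages out) := by unfold Spec_prioritize_crawl_py; infer_instance

def pvDiffWitness_prioritize_crawl_py : (List (String × List String)) × String × Int := ([("about", ["a", "b"])], "s", -1)
def pvDiffWitnessOut_prioritize_crawl_py : (List (String × String)) × (List (String × String)) :=
  ([("s", "homepage"), ("a", "about")], [])

-- ===== CLAIM (what is proved, stated in full; the proofs are below) =====
def Claim_unchanged_prioritize_crawl_py : Prop := ∀ (classified : List (String × List String)) (start_url : String) (max_pages : Int), Dom_prioritize_crawl_py classified start_url max_pages → Spec_prioritize_crawl_py classified start_url max_pages (prioritize_crawl_py classified start_url max_pages)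
def Claim_changed_prioritize_crawl_py : Prop := Dom_prioritize_crawl_py (pvDiffWitness_prioritize_crawl_py.1) (pvDiffWitness_prioritize_crawl_py.2.1) (pvDiffWitness_prioritize_crawl_py.2.2) ∧ D_prioritize_crawl_py (pvDiffWitness_prioritize_crawl_py.1) (pvDiffWitness_prioritize_crawl_py.2.1) (pvDiffWitness_prioritize_crawl_py.2.2) ∧ prioritize_crawl_py (pvDiffWitness_prioritize_crawl_py.1) (pvDiffWitness_prioritize_crawl_py.2.1) (pvDiffWitness_prioritize_crawl_py.2.2) = pvDiffWitnessOut_prioritize_crawl_py.1 ∧ prioritize_crawl_py_alt (pvDiffWitness_prioritize_crawl_py.1) (pvDiffWitness_prioritize_crawl_py.2.1) (pvDiffWitness_prioritize_crawl_py.2.2) = pvDiffWitnessOut_prioritize_crawl_py.2 ∧ pvDiffWitnessOut_prioritize_crawl_py.1 ≠ pvDiffWitnessOut_prioritize_crawl_py.2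
def Claim_exact_prioritize_crawl_py : Prop := ∀ (classified : List (String × List String)) (start_url : String) (max_pages : Int), Dom_prioritize_crawl_py classified start_url max_pages → D_prioritize_crawl_py classified start_url max_pages → prioritize_crawl_py classified start_url max_pages ≠ prioritize_crawl_py_alt classified start_url max_pages

-- ===== LEMMAS AND PROOFS =====

-- the final-slice step, abstracted: A's conditional top-up + final [:m] slice equals a plain
-- take of the budget from fixed ++ (all tagged 'other' pages), outside the D_ region
lemma pvKey (fixed : List (String × String)) (oth : List String) (f : String → String × String) (m : Int)
    (hnd : ¬(m < 0 ∧ 0 < (fixed.length : Int) + m)) :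
    PySem.List.slice (if m - (fixed.length : Int) > 0 then fixed ++ (PySem.List.slice oth none (some (m - (fixed.length : Int)))).map f else fixed) none (some m)
      = List.take m.toNat (fixed ++ oth.map f) := by
  rcases lt_trichotomy m 0 with hm | hm | hm
  · rw [if_neg (by omega : ¬ m - (fixed.length : Int) > 0)]
    have hFm : (fixed.length : Int) + m ≤ 0 := by
      by_contra hc
      exact hnd ⟨hm, by omega⟩
    have hmn : m = -(((-m).toNat : Nat) : Int) := by omega
    rw [hmn, PySem.List.slice_to_neg_natCast _ _ (by omega)]
    have h1 : fixed.length - (-m).toNat = 0 := by omega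
    have h2 : (-(((-m).toNat : Nat) : Int)).toNat = 0 := by omega
    rw [h1, h2]
    simp
  · subst hm
    rw [if_neg (by omega : ¬ (0:Int) - (fixed.length : Int) > 0), PySem.List.slice_to _ (by omega)]
    simp
  · rw [PySem.List.slice_to _ (by omega)]
    by_cases hr : m - (fixed.length : Int) > 0
    · rw [if_pos hr, PySem.List.slice_to _ (by omega), List.take_append, List.take_append,
        List.take_of_length_le (by omega : fixed.length ≤ m.toNat)]
      congr 1
      rw [← List.map_take, ← List.map_take, List.take_take]
      congr 2
      omega
    · rw [if_neg hr, List.take_append]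
      have h0 : m.toNat - fixed.length = 0 := by omega
      rw [h0]
      simp

-- the length of A's fixed (pre-'other') part is pvFixedLen
lemma pvFixedLen_eq (classified : List (String × List String)) (start_url : String) :
    (((List.map (fun x => (x, "homepage")) (PySem.List.slice ((⟨classified⟩ : PySem.Dict String (List String)).getD "homepage" [start_url]) none (some 1)) ++
      (List.map (fun x => (x, "about")) (PySem.List.slice ((⟨classified⟩ : PySem.Dict String (List String)).getD "about" []) none (some 2)) ++
      (List.map (fun x => (x, "product")) (PySem.List.slice ((⟨classified⟩ : PySem.Dict String (List String)).getD "product" []) none (some 12)) ++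
      (List.map (fun x => (x, "category")) (PySem.List.slice ((⟨classified⟩ : PySem.Dict String (List String)).getD "category" []) none (some 5)) ++
       List.map (fun x => (x, "blog")) (PySem.List.slice ((⟨classified⟩ : PySem.Dict String (List String)).getD "blog" []) none (some 8)))))).length : Nat) : Int)
      = pvFixedLen classified start_url := by
  simp [pysem, pvFixedLen, pvMin]
  omega

-- the tagged pages one plan row contributes when the budget is unlimited
def pvExpand (classified : List (String × List String)) (r : String × List String × Option Int) : List (String × String) :=
  (match r.2.2 with
   | none => PySem.Dict.getD (⟨classified⟩ : PySem.Dict String (List String)) r.1 r.2.1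
   | some c => PySem.List.slice (PySem.Dict.getD (⟨classified⟩ : PySem.Dict String (List String)) r.1 r.2.1) none (some c)).map
    (fun url => (url, r.1))

-- spending a budget over the plan = plain take of the budget from the full expansion
lemma pvSpend_eq_take (classified : List (String × List String)) :
    ∀ (rows : List (String × List String × Option Int)),
      (∀ r ∈ rows, ∀ c, r.2.2 = some c → 0 ≤ c) →
      ∀ rem : Int, pvSpend classified rows rem = List.take rem.toNat (rows.flatMap (pvExpand classified))
  | [], _, rem => by simp [pvSpend]
  | (key, dflt, cap) :: rest, h, rem => by
    by_cases hrem : rem ≤ 0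
    · have h0 : rem.toNat = 0 := Int.toNat_of_nonpos hrem
      simp [pvSpend, hrem, h0]
    · rw [not_le] at hrem
      have hrest := pvSpend_eq_take classified rest (fun r hr => h r (List.mem_cons_of_mem _ hr))
      cases cap with
      | none =>
        simp only [pvSpend, if_neg (not_le.mpr hrem), hrest, List.flatMap_cons,
          PySem.List.slice_to _ (le_of_lt hrem)]
        rw [List.take_append]
        unfold pvExpand
        simp only [← List.map_take, List.length_take, List.length_map]
        congr 2
        omega
      | some c =>
        have hc : (0:Int) ≤ c := h _ (List.mem_cons_self) c rfl
        have hmin : (0:Int) ≤ min c rem := by omega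
        simp only [pvSpend, if_neg (not_le.mpr hrem), hrest, List.flatMap_cons,
          PySem.List.slice_to _ hmin]
        rw [List.take_append]
        unfold pvExpand
        simp only [PySem.List.slice_to _ hc, ← List.map_take, List.take_take,
          List.length_take, List.length_map]
        congr 1
        · congr 2
          omega
        · congr 1
          omega

lemma prioritize_unchanged (classified : List (String × List String)) (start_url : String) (max_pages : Int)
    (h : ¬ D_prioritize_crawl_py classified start_url max_pages) :
    prioritize_crawl_py classified start_url max_pages = prioritize_crawl_py_alt classified start_url max_pages := by
  have hcaps : ∀ r ∈ ([("homepage", [start_url], some 1), ("about", [], some 2), ("product", [], some 12),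
      ("category", [], some 5), ("blog", [], some 8), ("other", [], none)] :
        List (String × List String × Option Int)), ∀ c, r.2.2 = some c → 0 ≤ c := by
    intro r hr c hc
    fin_cases hr <;> simp_all <;> omega
  unfold prioritize_crawl_py prioritize_crawl_py_alt
  rw [pvSpend_eq_take classified _ hcaps]
  simp only [List.flatMap_cons, List.flatMap_nil, List.append_nil, pvExpand,
    PySem.List.foldl_append_singleton_eq_map, List.nil_append, List.append_assoc]
  set T1 := List.map (fun x => (x, "homepage")) (PySem.List.slice ((⟨classified⟩ : PySem.Dict String (List String)).getD "homepage" [start_url]) none (some 1)) with hT1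
  set T2 := List.map (fun x => (x, "about")) (PySem.List.slice ((⟨classified⟩ : PySem.Dict String (List String)).getD "about" []) none (some 2)) with hT2
  set T3 := List.map (fun x => (x, "product")) (PySem.List.slice ((⟨classified⟩ : PySem.Dict String (List String)).getD "product" []) none (some 12)) with hT3
  set T4 := List.map (fun x => (x, "category")) (PySem.List.slice ((⟨classified⟩ : PySem.Dict String (List String)).getD "category" []) none (some 5)) with hT4
  set T5 := List.map (fun x => (x, "blog")) (PySem.List.slice ((⟨classified⟩ : PySem.Dict String (List String)).getD "blog" []) none (some 8)) with hT5
  set ot := (⟨classified⟩ : PySem.Dict String (List String)).getD "other" ([] : List String) with hot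
  set fx := T1 ++ (T2 ++ (T3 ++ (T4 ++ T5))) with hfx
  have hassoc : ∀ (z : List (String × String)), T1 ++ (T2 ++ (T3 ++ (T4 ++ (T5 ++ z)))) = fx ++ z := by
    intro z
    rw [hfx]
    simp [List.append_assoc]
  rw [hassoc, hassoc]
  refine pvKey fx ot (fun x => (x, "other")) max_pages ?_
  rw [hfx, hT1, hT2, hT3, hT4, hT5]
  rw [pvFixedLen_eq classified start_url]
  simp only [D_prioritize_crawl_py] at h
  exact h

-- ===== VERDICT (by name: the statements are the Claim_ definitions above) =====
theorem prioritize_crawl_py_spec : Claim_unchanged_prioritize_crawl_py := by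
  intro classified start_url max_pages _ hD
  exact prioritize_unchanged classified start_url max_pages hD

theorem prioritize_crawl_py_changed : Claim_changed_prioritize_crawl_py := by
  unfold Claim_changed_prioritize_crawl_py; decide

theorem prioritize_crawl_py_tight : Claim_exact_prioritize_crawl_py := by
  intro classified start_url max_pages _ hD
  obtain ⟨hm, hF⟩ := hD
  have hcaps : ∀ r ∈ ([("homepage", [start_url], some 1), ("about", [], some 2), ("product", [], some 12),
      ("category", [], some 5), ("blog", [], some 8), ("other", [], none)] :
        List (String × List String × Option Int)), ∀ c, r.2.2 = some c → 0 ≤ c := by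
    intro r hr c hc
    fin_cases hr <;> simp_all <;> omega
  have hB : prioritize_crawl_py_alt classified start_url max_pages = [] := by
    unfold prioritize_crawl_py_alt
    rw [pvSpend_eq_take classified _ hcaps]
    simp [Int.toNat_of_nonpos (le_of_lt hm)]
  rw [hB]
  have hlen := pvFixedLen_eq classified start_url
  unfold prioritize_crawl_py
  simp only [PySem.List.foldl_append_singleton_eq_map, List.nil_append, List.append_assoc]
  set T1 := List.map (fun x => (x, "homepage")) (PySem.List.slice ((⟨classified⟩ : PySem.Dict String (List String)).getD "homepage" [start_url]) none (some 1)) with hT1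
  set T2 := List.map (fun x => (x, "about")) (PySem.List.slice ((⟨classified⟩ : PySem.Dict String (List String)).getD "about" []) none (some 2)) with hT2
  set T3 := List.map (fun x => (x, "product")) (PySem.List.slice ((⟨classified⟩ : PySem.Dict String (List String)).getD "product" []) none (some 12)) with hT3
  set T4 := List.map (fun x => (x, "category")) (PySem.List.slice ((⟨classified⟩ : PySem.Dict String (List String)).getD "category" []) none (some 5)) with hT4
  set T5 := List.map (fun x => (x, "blog")) (PySem.List.slice ((⟨classified⟩ : PySem.Dict String (List String)).getD "blog" []) none (some 8)) with hT5
  set fx := T1 ++ (T2 ++ (T3 ++ (T4 ++ T5))) with hfx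
  rw [if_neg (by omega : ¬ max_pages - ((fx.length : Nat) : Int) > 0)]
  have hmn : max_pages = -(((-max_pages).toNat : Nat) : Int) := by omega
  rw [hmn, PySem.List.slice_to_neg_natCast _ _ (by omega)]
  have hpos : 0 < (fx.take (fx.length - (-max_pages).toNat)).length := by
    rw [List.length_take]
    omega
  intro heq
  rw [heq] at hpos
  simp at hpos
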